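-- pv_equiv track=rewrite | github.com/AaronRch27/algortimo_revision | scripts/principal_validar.py | niveles
-- ===== SOURCE A (Python) =====
-- def niveles(lista_de_listas):
--     "Definir niveles en preguntas que no son tablas"
--     res = []
--     if len(lista_de_listas[0])>1:
--         c=0
--         for i in range(0,len(lista_de_listas[0])-1):
--             p = lista_de_listas[0]
--             x = p[c]
--             xa = x[0]
--             ad = lista_de_listas[0]
--             ad1 = ad[c+1]
--             x1 = ad1[0]
--             esp = x1-1
--             lis = [x]
--             for vl in lista_de_listas[1]:
--                 x2 = vl[0]
--                 if x2 < esp and x2 > xa: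
--                     lis.append(vl)
--             c+=1
--             res.append(lis)
--         try:
--             p = lista_de_listas[0]
--             q = p[-1]
--             x = q[0]
--             lid = [q]
--             for v in lista_de_listas[1]:
--                 x2 = v[0]
--                 if x2 > x:
--                     lid.append(v)
--             if len(lid)>1:
--                 res.append(lid)
--         except:
--             pass
--     if len(lista_de_listas[0])==1:
--
--         p = lista_de_listas[0]
--         q = p[0]
--         x = q[0]
--         lid = [q]
--         for v in lista_de_listas[1]:
--             x2 = v[0]
--             if x2 > x:
--                 lid.append(v)
--         if len(lid)>1:
--             res.append(lid)
--     return res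
-- ===== SOURCE B (Python) =====
-- def _upper(a, x):
--     """Index of the first element of sorted list a that is > x (hand-rolled
--     bisect_right; the module A lives in imports nothing)."""
--     lo, hi = 0, len(a)
--     while lo < hi:
--         mid = (lo + hi) // 2
--         if a[mid] <= x:
--             lo = mid + 1
--         else:
--             hi = mid
--     return lo
--
--
-- def niveles(lista_de_listas):
--     "Definir niveles en preguntas que no son tablas"
--     headers = lista_de_listas[0]
--     if not headers:
--         return []
--     items = lista_de_listas[1]
--     n = len(items)
--     # sort the item positions ONCE by coordinate (stable), keeping original indices
--     order = sorted(range(n), key=lambda k: items[k][0])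
--     xs = [items[k][0] for k in order]
--     lows = [h[0] for h in headers]
--     res = []
--     for j in range(len(headers) - 1):
--         lo = lows[j]
--         hi = lows[j + 1] - 2  # items strictly between lo and lows[j+1]-1, i.e. lo < x <= hi
--         ks = sorted(order[_upper(xs, lo):_upper(xs, hi)])
--         res.append([headers[j]] + [items[k] for k in ks])
--     ks = sorted(order[_upper(xs, lows[-1]):])
--     last = [headers[-1]] + [items[k] for k in ks]
--     if len(last) > 1:
--         res.append(last)
--     return res
-- ===== Notes on version B (the rewrite author's own statement) =====
-- stated objective: alternative
-- what changed: A scans the whole item list once per header bucket; B sorts the item indices by coordinate once and locates each bucket's window with two hand-rolled binary searches, re-sorting only the hits back into input order (it trades A's per-bucket rescans for one global sort plus per-bucket O(log N) lookups).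
import Mathlib
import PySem

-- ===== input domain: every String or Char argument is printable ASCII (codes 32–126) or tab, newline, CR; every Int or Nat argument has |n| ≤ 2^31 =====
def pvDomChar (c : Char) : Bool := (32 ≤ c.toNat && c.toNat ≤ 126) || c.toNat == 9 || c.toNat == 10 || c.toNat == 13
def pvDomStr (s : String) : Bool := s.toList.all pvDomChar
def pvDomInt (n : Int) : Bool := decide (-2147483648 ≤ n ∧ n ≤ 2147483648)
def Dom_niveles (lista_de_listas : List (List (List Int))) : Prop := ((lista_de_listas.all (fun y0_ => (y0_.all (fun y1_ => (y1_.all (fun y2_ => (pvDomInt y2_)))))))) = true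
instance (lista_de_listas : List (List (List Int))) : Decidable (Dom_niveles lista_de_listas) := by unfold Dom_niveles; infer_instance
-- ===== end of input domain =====

-- B replaces A's per-bucket rescan of the whole item list by one stable sort of the item
-- indices by coordinate plus two binary searches per bucket (a different algorithm; the
-- timing run measured no speed difference on its generated inputs).

-- ===== PORT A =====
-- Literal port of A.  Python raises exactly where a pyGetD default below would be read
-- (lista_de_listas[0]/[1] on a too-short list, h[0]/v[0] on an empty inner list); those
-- inputs are excluded by Pre_niveles, so every default is unreachable inside Pre_.
-- Inside Pre_ nothing in the 'try' block raises, so 'except: pass' is never taken.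
def niveles (lista_de_listas : List (List (List Int))) : List (List (List Int)) :=
  let p0 := PySem.List.pyGetD lista_de_listas 0 []      -- lista_de_listas[0]
  let res :=
    if 1 < p0.length then                               -- len(lista_de_listas[0]) > 1
      let st :=
        (PySem.List.pyRange 0 ((p0.length : Int) - 1) 1).foldl
          (fun (st : Int × List (List (List Int))) (_i : Int) =>
            let c := st.1
            let p := PySem.List.pyGetD lista_de_listas 0 []
            let x := PySem.List.pyGetD p c []           -- p[c]
            let xa := PySem.List.pyGetD x 0 0           -- x[0]
            let ad := PySem.List.pyGetD lista_de_listas 0 []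
            let ad1 := PySem.List.pyGetD ad (c + 1) []  -- ad[c+1]
            let x1 := PySem.List.pyGetD ad1 0 0         -- ad1[0]
            let esp := x1 - 1
            let lis :=
              (PySem.List.pyGetD lista_de_listas 1 []).foldl
                (fun lis vl =>
                  let x2 := PySem.List.pyGetD vl 0 0    -- vl[0]
                  if x2 < esp ∧ x2 > xa then lis ++ [vl] else lis)
                [x]
            (c + 1, st.2 ++ [lis]))
          ((0 : Int), [])
      let res := st.2
      let p := PySem.List.pyGetD lista_de_listas 0 []
      let q := PySem.List.pyGetD p (-1) []              -- p[-1]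
      let x := PySem.List.pyGetD q 0 0                  -- q[0]
      let lid :=
        (PySem.List.pyGetD lista_de_listas 1 []).foldl
          (fun lid v =>
            let x2 := PySem.List.pyGetD v 0 0           -- v[0]
            if x2 > x then lid ++ [v] else lid)
          [q]
      if 1 < lid.length then res ++ [lid] else res
    else []
  if p0.length = 1 then                                 -- len(lista_de_listas[0]) == 1
    let p := PySem.List.pyGetD lista_de_listas 0 []
    let q := PySem.List.pyGetD p 0 []                   -- p[0]
    let x := PySem.List.pyGetD q 0 0                    -- q[0]
    let lid :=
      (PySem.List.pyGetD lista_de_listas 1 []).foldl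
        (fun lid v =>
          let x2 := PySem.List.pyGetD v 0 0             -- v[0]
          if x2 > x then lid ++ [v] else lid)
        [q]
    if 1 < lid.length then res ++ [lid] else res
  else res

-- ===== PORT B =====
-- _upper(a, x) of Source B: first index of the sorted list a holding an element > x.
-- 'a[mid]' is in range at every call (0 ≤ lo ≤ mid < hi ≤ len a), so List.getD is exact;
-- Python's '//' on the nonnegative ints lo, hi is Nat division.
def upperGo (a : List Int) (x : Int) (lo hi : Nat) : Nat :=
  if h : lo < hi then
    let mid := (lo + hi) / 2
    if a.getD mid 0 ≤ x then upperGo a x (mid + 1) hi else upperGo a x lo mid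
  else lo
termination_by hi - lo
decreasing_by all_goals omega

def upper (a : List Int) (x : Int) : Nat := upperGo a x 0 a.length

-- literal port of Source B's niveles (same unreachable-inside-Pre_ pyGetD defaults as port A)
def niveles_alt (lista_de_listas : List (List (List Int))) : List (List (List Int)) :=
  let headers := PySem.List.pyGetD lista_de_listas 0 []
  if headers = [] then []                               -- if not headers: return []
  else
    let items := PySem.List.pyGetD lista_de_listas 1 []
    let n := items.length
    let key : Int → Int := fun k => PySem.List.pyGetD (PySem.List.pyGetD items k []) 0 0
    let order := PySem.List.sorted (PySem.List.pyRange 0 (n : Int) 1) key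
    let xs := order.map key                             -- [items[k][0] for k in order]
    let lows := headers.map (fun h => PySem.List.pyGetD h 0 0)
    let res :=
      (PySem.List.pyRange 0 ((headers.length : Int) - 1) 1).foldl
        (fun res (j : Int) =>
          let lo := PySem.List.pyGetD lows j 0
          let hi := PySem.List.pyGetD lows (j + 1) 0 - 2
          let ks := PySem.List.sorted
              (PySem.List.slice order (some ((upper xs lo : Nat) : Int))
                (some ((upper xs hi : Nat) : Int)))
              (fun k => k)
          res ++ [PySem.List.pyGetD headers j [] ::
                    ks.map (fun k => PySem.List.pyGetD items k [])])
        []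
    let ks := PySem.List.sorted
        (PySem.List.slice order
          (some ((upper xs (PySem.List.pyGetD lows (-1) 0) : Nat) : Int)) none)
        (fun k => k)
    let last := PySem.List.pyGetD headers (-1) [] ::
                  ks.map (fun k => PySem.List.pyGetD items k [])
    if 1 < last.length then res ++ [last] else res

-- ===== PRECONDITION & SPEC =====
-- Exactly the inputs where the Python A returns normally: A raises IndexError on the empty
-- outer list, on an empty header list h (h[0]) and, once headers exist, on a missing
-- items list lista_de_listas[1] or an empty item v (v[0]).
def Pre_niveles (lista_de_listas : List (List (List Int))) : Prop :=
  lista_de_listas ≠ [] ∧ (∀ h ∈ lista_de_listas.headD [], h ≠ []) ∧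
    (lista_de_listas.headD [] = [] ∨
      (2 ≤ lista_de_listas.length ∧ ∀ v ∈ lista_de_listas.getD 1 [], v ≠ []))
instance (lista_de_listas : List (List (List Int))) : Decidable (Pre_niveles lista_de_listas) := by
  unfold Pre_niveles; infer_instance

def pvWitness_niveles : List (List (List Int)) := [[[0], [5]], [[1], [3], [10]]]

def Spec_niveles (lista_de_listas : List (List (List Int))) (out : List (List (List Int))) : Prop :=
  out = niveles_alt lista_de_listas
instance (lista_de_listas : List (List (List Int))) (out : List (List (List Int))) :
    Decidable (Spec_niveles lista_de_listas out) := by unfold Spec_niveles; infer_instance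

-- ===== CLAIM (what is proved, stated in full; the proofs are below) =====
def Claim_equal_niveles : Prop :=
  ∀ (lista_de_listas : List (List (List Int))), Dom_niveles lista_de_listas →
    Pre_niveles lista_de_listas → Spec_niveles lista_de_listas (niveles lista_de_listas)

-- ===== LEMMAS AND PROOFS =====

-- invariant proof for Source B's binary search: everything left of the result is ≤ x,
-- everything from the result on is > x
theorem upperGo_spec (a : List Int) (x : Int) (hs : List.Pairwise (· ≤ ·) a) :
    ∀ (n lo hi : Nat), hi - lo ≤ n → lo ≤ hi → hi ≤ a.length →
      (∀ (j : Nat) (hj : j < a.length), j < lo → a[j] ≤ x) →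
      (∀ (j : Nat) (hj : j < a.length), hi ≤ j → x < a[j]) →
      lo ≤ upperGo a x lo hi ∧ upperGo a x lo hi ≤ hi ∧
        (∀ (j : Nat) (hj : j < a.length), j < upperGo a x lo hi → a[j] ≤ x) ∧
        (∀ (j : Nat) (hj : j < a.length), upperGo a x lo hi ≤ j → x < a[j]) := by
  intro n
  induction n with
  | zero =>
    intro lo hi hfuel hle hlen Hlo Hhi
    have : ¬ lo < hi := by omega
    rw [upperGo, dif_neg this]
    refine ⟨le_refl _, by omega, fun j hj hlt => Hlo j hj hlt, fun j hj hge => Hhi j hj (by omega)⟩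
  | succ n ih =>
    intro lo hi hfuel hle hlen Hlo Hhi
    by_cases h : lo < hi
    · rw [upperGo, dif_pos h]
      have hmid : (lo + hi) / 2 < a.length := by omega
      have hgetd : a.getD ((lo + hi) / 2) 0 = a[(lo + hi) / 2] := List.getD_eq_getElem a 0 hmid
      by_cases hc : a.getD ((lo + hi) / 2) 0 ≤ x
      · rw [if_pos hc]
        have hres := ih ((lo + hi) / 2 + 1) hi (by omega) (by omega) hlen
          (fun j hj hlt => by
            have : a[j] ≤ a[(lo + hi) / 2] := by
              rcases Nat.lt_or_ge j ((lo + hi) / 2) with hj' | hj'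
              · exact List.pairwise_iff_getElem.mp hs j _ hj hmid hj'
              · have : j = (lo + hi) / 2 := by omega
                subst this; exact le_refl _
            omega)
          Hhi
        exact ⟨by omega, hres.2.1, hres.2.2.1, hres.2.2.2⟩
      · rw [if_neg hc]
        rw [not_le] at hc
        have hres := ih lo ((lo + hi) / 2) (by omega) (by omega) (by omega) Hlo
          (fun j hj hge => by
            have : a[(lo + hi) / 2] ≤ a[j] := by
              rcases Nat.lt_or_ge ((lo + hi) / 2) j with hj' | hj'
              · exact List.pairwise_iff_getElem.mp hs _ j hmid hj hj'
              · have : j = (lo + hi) / 2 := by omega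
                subst this; exact le_refl _
            omega)
        exact ⟨hres.1, by omega, hres.2.2.1, hres.2.2.2⟩
    · rw [upperGo, dif_neg h]
      exact ⟨le_refl _, by omega, fun j hj hlt => Hlo j hj hlt,
        fun j hj hge => Hhi j hj (by omega)⟩

theorem upper_spec (a : List Int) (x : Int) (hs : List.Pairwise (· ≤ ·) a) :
    upper a x ≤ a.length ∧
      (∀ (j : Nat) (hj : j < a.length), j < upper a x → a[j] ≤ x) ∧
      (∀ (j : Nat) (hj : j < a.length), upper a x ≤ j → x < a[j]) := by
  have h := upperGo_spec a x hs a.length 0 a.length (by omega) (by omega) (le_refl _)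
    (fun j hj hlt => by omega) (fun j hj hge => by omega)
  exact ⟨h.2.1, h.2.2.1, h.2.2.2⟩

-- a window of a list equals a filter, given per-index information that the predicate
-- holds exactly on the window
theorem take_drop_eq_filter {α : Type} (ys : List α) (p : α → Bool) (u1 u2 : Nat)
    (hmid : ∀ (j : Nat) (hj : j < ys.length), u1 ≤ j → j < u2 → p ys[j] = true)
    (hout : ∀ (j : Nat) (hj : j < ys.length), j < u1 ∨ u2 ≤ j → p ys[j] = false) :
    (ys.drop u1).take (u2 - u1) = ys.filter p := by
  rcases Nat.lt_or_ge u2 (u1 + 1) with hle' | hlt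
  · have hle : u2 ≤ u1 := by omega
    have h0 : u2 - u1 = 0 := by omega
    rw [h0, List.take_zero]
    symm
    rw [List.filter_eq_nil_iff]
    intro a ha
    obtain ⟨j, hj, rfl⟩ := List.mem_iff_getElem.mp ha
    rcases Nat.lt_or_ge j u1 with hj' | hj'
    · simp [hout j hj (Or.inl hj')]
    · simp [hout j hj (Or.inr (by omega))]
  · conv_rhs => rw [← List.take_append_drop u1 ys, List.filter_append,
      ← List.take_append_drop (u2 - u1) (ys.drop u1), List.filter_append]
    have h1 : List.filter p (ys.take u1) = [] := by
      rw [List.filter_eq_nil_iff]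
      intro a ha
      obtain ⟨j, hj, rfl⟩ := List.mem_iff_getElem.mp ha
      have hj' : j < u1 ∧ j < ys.length := by
        have := hj; rw [List.length_take] at this; omega
      rw [List.getElem_take]
      simp [hout j hj'.2 (Or.inl hj'.1)]
    have h2 : List.filter p ((ys.drop u1).take (u2 - u1)) = (ys.drop u1).take (u2 - u1) := by
      rw [List.filter_eq_self]
      intro a ha
      obtain ⟨j, hj, rfl⟩ := List.mem_iff_getElem.mp ha
      have hj' : j < u2 - u1 ∧ u1 + j < ys.length := by
        have := hj; rw [List.length_take, List.length_drop] at this; omega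
      rw [List.getElem_take, List.getElem_drop]
      exact hmid (u1 + j) hj'.2 (by omega) (by omega)
    have h3 : List.filter p ((ys.drop u1).drop (u2 - u1)) = [] := by
      rw [List.drop_drop, List.filter_eq_nil_iff]
      intro a ha
      obtain ⟨j, hj, rfl⟩ := List.mem_iff_getElem.mp ha
      have hj' : (u1 + (u2 - u1)) + j < ys.length := by
        have := hj; rw [List.length_drop] at this; omega
      rw [List.getElem_drop]
      simp [hout _ hj' (Or.inr (by omega))]
    rw [h1, h2, h3]
    simp

-- a final segment of a list equals a filter, likewise
theorem drop_eq_filter {α : Type} (ys : List α) (p : α → Bool) (u1 : Nat)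
    (hmid : ∀ (j : Nat) (hj : j < ys.length), u1 ≤ j → p ys[j] = true)
    (hout : ∀ (j : Nat) (hj : j < ys.length), j < u1 → p ys[j] = false) :
    ys.drop u1 = ys.filter p := by
  conv_rhs => rw [← List.take_append_drop u1 ys, List.filter_append]
  have h1 : List.filter p (ys.take u1) = [] := by
    rw [List.filter_eq_nil_iff]
    intro a ha
    obtain ⟨j, hj, rfl⟩ := List.mem_iff_getElem.mp ha
    have hj' : j < u1 ∧ j < ys.length := by
      have := hj; rw [List.length_take] at this; omega
    rw [List.getElem_take]
    simp [hout j hj'.2 hj'.1]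
  have h2 : List.filter p (ys.drop u1) = ys.drop u1 := by
    rw [List.filter_eq_self]
    intro a ha
    obtain ⟨j, hj, rfl⟩ := List.mem_iff_getElem.mp ha
    have hj' : u1 + j < ys.length := by
      have := hj; rw [List.length_drop] at this; omega
    rw [List.getElem_drop]
    exact hmid (u1 + j) hj' (by omega)
  rw [h1, h2]
  simp

-- the slice of the key-sorted list between the two binary-search bounds is a filter
theorem slice_upper_eq_filter (ys : List Int) (key : Int → Int)
    (hs : List.Pairwise (· ≤ ·) (ys.map key)) (lo hi : Int) :
    PySem.List.slice ys (some ((upper (ys.map key) lo : Nat) : Int))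
        (some ((upper (ys.map key) hi : Nat) : Int))
      = ys.filter (fun k => decide (lo < key k ∧ key k ≤ hi)) := by
  rw [PySem.List.slice_natCast]
  have h1 := upper_spec (ys.map key) lo hs
  have h2 := upper_spec (ys.map key) hi hs
  apply take_drop_eq_filter
  · intro j hj hge hlt
    have ha := h1.2.2 j (by simpa using hj) hge
    have hb := h2.2.1 j (by simpa using hj) hlt
    rw [List.getElem_map] at ha hb
    simp only [decide_eq_true_eq]
    omega
  · intro j hj hor
    rcases hor with hlt | hge
    · have ha := h1.2.1 j (by simpa using hj) hlt
      rw [List.getElem_map] at ha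
      simp only [decide_eq_false_iff_not]
      omega
    · have hb := h2.2.2 j (by simpa using hj) hge
      rw [List.getElem_map] at hb
      simp only [decide_eq_false_iff_not]
      omega

theorem slice_upper_eq_filter_from (ys : List Int) (key : Int → Int)
    (hs : List.Pairwise (· ≤ ·) (ys.map key)) (lo : Int) :
    PySem.List.slice ys (some ((upper (ys.map key) lo : Nat) : Int)) none
      = ys.filter (fun k => decide (lo < key k)) := by
  rw [PySem.List.slice_from_natCast]
  have h1 := upper_spec (ys.map key) lo hs
  apply drop_eq_filter
  · intro j hj hge
    have ha := h1.2.2 j (by simpa using hj) hge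
    rw [List.getElem_map] at ha
    simp only [decide_eq_true_eq]
    omega
  · intro j hj hlt
    have ha := h1.2.1 j (by simpa using hj) hlt
    rw [List.getElem_map] at ha
    simp only [decide_eq_false_iff_not]
    omega

-- re-sorting a filtered rearrangement of a strictly increasing list gives its filter
theorem sorted_filter_of_pairwise_lt (xs : List Int) (key : Int → Int) (p : Int → Bool)
    (hx : List.Pairwise (· < ·) xs) :
    PySem.List.sorted ((PySem.List.sorted xs key).filter p) (fun k => k) = xs.filter p :=
  PySem.List.sorted_eq_of_perm_of_pairwise_lt _ _ _
    (((PySem.List.sorted_perm xs key false).filter p).symm) (hx.filter p)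

-- mapping k ↦ items[k] over the filtered index range is the filter of items itself
theorem map_filter_range (items : List (List Int)) (q : List Int → Bool) :
    ((PySem.List.pyRange 0 (items.length : Int) 1).filter
        (fun k => q (PySem.List.pyGetD items k []))).map
      (fun k => PySem.List.pyGetD items k [])
    = items.filter q := by
  induction items using List.reverseRecOn with
  | nil =>
    rw [PySem.List.pyRange_one_eq_nil (by simp)]
    simp
  | append_singleton l a ih =>
    have hcast : (((l ++ [a]).length : Nat) : Int) = (l.length : Int) + 1 := by
      simp
    rw [hcast, PySem.List.pyRange_one_succ_right (by positivity)]
    rw [List.filter_append, List.map_append]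
    have hgl : ∀ k ∈ PySem.List.pyRange 0 (l.length : Int) 1,
        PySem.List.pyGetD (l ++ [a]) k [] = PySem.List.pyGetD l k [] := by
      intro k hk
      rw [PySem.List.mem_pyRange_one] at hk
      rw [PySem.List.pyGetD_of_nonneg _ _ hk.1, PySem.List.pyGetD_of_nonneg _ _ hk.1]
      have hk' : k.toNat < l.length := by omega
      rw [List.getD_eq_getElem?_getD, List.getD_eq_getElem?_getD,
        List.getElem?_append_left hk']
    have hfilter : (PySem.List.pyRange 0 (l.length : Int) 1).filter
          (fun k => q (PySem.List.pyGetD (l ++ [a]) k []))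
        = (PySem.List.pyRange 0 (l.length : Int) 1).filter
          (fun k => q (PySem.List.pyGetD l k [])) :=
      List.filter_congr (fun k hk => by rw [hgl k hk])
    have hmap : ((PySem.List.pyRange 0 (l.length : Int) 1).filter
            (fun k => q (PySem.List.pyGetD l k []))).map
          (fun k => PySem.List.pyGetD (l ++ [a]) k [])
        = ((PySem.List.pyRange 0 (l.length : Int) 1).filter
            (fun k => q (PySem.List.pyGetD l k []))).map
          (fun k => PySem.List.pyGetD l k []) :=
      List.map_congr_left (fun k hk => hgl k (List.mem_of_mem_filter hk))
    rw [hfilter, hmap, ih]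
    have hlast : PySem.List.pyGetD (l ++ [a]) ((l.length : Nat) : Int) [] = a := by
      rw [PySem.List.pyGetD_natCast]
      simp [List.getD_eq_getElem?_getD]
    by_cases hq : q a
    · simp [List.filter_append, hlast, hq]
    · simp [List.filter_append, hlast, hq]

-- the B-side selection for one inner bucket: sort once, two binary searches, re-sort the
-- hits by index — equals the one-pass filter the A side performs
theorem selected_eq (items : List (List Int)) (lo hi : Int) :
    (PySem.List.sorted
        (PySem.List.slice
          (PySem.List.sorted (PySem.List.pyRange 0 (items.length : Int) 1)
            (fun k => PySem.List.pyGetD (PySem.List.pyGetD items k []) 0 0))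
          (some ((upper
              ((PySem.List.sorted (PySem.List.pyRange 0 (items.length : Int) 1)
                  (fun k => PySem.List.pyGetD (PySem.List.pyGetD items k []) 0 0)).map
                (fun k => PySem.List.pyGetD (PySem.List.pyGetD items k []) 0 0)) lo : Nat) : Int))
          (some ((upper
              ((PySem.List.sorted (PySem.List.pyRange 0 (items.length : Int) 1)
                  (fun k => PySem.List.pyGetD (PySem.List.pyGetD items k []) 0 0)).map
                (fun k => PySem.List.pyGetD (PySem.List.pyGetD items k []) 0 0)) hi : Nat) : Int)))
        (fun k => k)).map (fun k => PySem.List.pyGetD items k [])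
      = items.filter (fun v =>
          decide (lo < PySem.List.pyGetD v 0 0 ∧ PySem.List.pyGetD v 0 0 ≤ hi)) := by
  rw [slice_upper_eq_filter _ _ (PySem.List.sorted_map_key_pairwise _ _) lo hi]
  rw [sorted_filter_of_pairwise_lt _ _ _ (PySem.List.pairwise_lt_pyRange_one 0 _)]
  exact map_filter_range items
    (fun v => decide (lo < PySem.List.pyGetD v 0 0 ∧ PySem.List.pyGetD v 0 0 ≤ hi))

-- the same for the unbounded last bucket
theorem selected_from_eq (items : List (List Int)) (lo : Int) :
    (PySem.List.sorted
        (PySem.List.slice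
          (PySem.List.sorted (PySem.List.pyRange 0 (items.length : Int) 1)
            (fun k => PySem.List.pyGetD (PySem.List.pyGetD items k []) 0 0))
          (some ((upper
              ((PySem.List.sorted (PySem.List.pyRange 0 (items.length : Int) 1)
                  (fun k => PySem.List.pyGetD (PySem.List.pyGetD items k []) 0 0)).map
                (fun k => PySem.List.pyGetD (PySem.List.pyGetD items k []) 0 0)) lo : Nat) : Int))
          none)
        (fun k => k)).map (fun k => PySem.List.pyGetD items k [])
      = items.filter (fun v => decide (lo < PySem.List.pyGetD v 0 0)) := by
  rw [slice_upper_eq_filter_from _ _ (PySem.List.sorted_map_key_pairwise _ _) lo]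
  rw [sorted_filter_of_pairwise_lt _ _ _ (PySem.List.pairwise_lt_pyRange_one 0 _)]
  exact map_filter_range items (fun v => decide (lo < PySem.List.pyGetD v 0 0))

-- A's index loop: the running counter c equals the range element, so the loop is a map
theorem foldl_counter_append {alpha : Type} (g : Int → alpha) :
    ∀ (n : Nat) (a : Int) (res : List alpha),
      (PySem.List.pyRange a (a + (n : Int)) 1).foldl
          (fun st _ => (st.1 + 1, st.2 ++ [g st.1])) (a, res)
        = (a + (n : Int), res ++ (PySem.List.pyRange a (a + (n : Int)) 1).map g) := by
  intro n
  induction n with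
  | zero =>
    intro a res
    rw [PySem.List.pyRange_one_eq_nil (by omega)]
    simp
  | succ n ih =>
    intro a res
    have h1 : a < a + ((n : Nat) + 1 : Int) := by omega
    have hc : (((n + 1 : Nat)) : Int) = (n : Int) + 1 := by push_cast; ring
    rw [hc, PySem.List.pyRange_one_cons h1]
    rw [List.foldl_cons]
    have hstep : (((a, res).1 + 1 : Int), (a, res).2 ++ [g (a, res).1]) = (a + 1, res ++ [g a]) := rfl
    rw [hstep]
    have h2 : a + ((n : Int) + 1) = (a + 1) + (n : Int) := by ring
    rw [h2, ih (a + 1) (res ++ [g a])]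
    simp [List.append_assoc]

-- the B-side lookup in lows = [h[0] for h in headers] is the composed lookup A performs
theorem pyGetD_lowf_map (l : List (List Int)) (i : Int) :
    PySem.List.pyGetD (List.map (fun h => PySem.List.pyGetD h 0 0) l) i 0
      = PySem.List.pyGetD (PySem.List.pyGetD l i []) 0 0 :=
  PySem.List.pyGetD_map _ l i []

-- A's strict window test and B's inclusive-upper-bound window test agree on integers
theorem decide_window_eq (a b x : Int) :
    (decide (x < b - 1 ∧ x > a)) = (decide (a < x ∧ x ≤ b - 2)) := by
  rw [decide_eq_decide]; omega

theorem decide_gt_eq (x q : Int) : (decide (x > q)) = (decide (q < x)) := rfl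

theorem niveles_eq_alt (L : List (List (List Int))) : niveles L = niveles_alt L := by
  simp only [niveles, niveles_alt]
  generalize PySem.List.pyGetD L 0 [] = l0
  generalize PySem.List.pyGetD L 1 [] = l1
  rcases l0 with _ | ⟨h0, t0⟩
  · simp
  · by_cases hH : 1 < (h0 :: t0).length
    · have hne1 : ¬((h0 :: t0).length = 1) := by
        rw [List.length_cons] at hH ⊢; omega
      rw [if_neg hne1, if_pos hH, if_neg (by simp : ¬(h0 :: t0 = []))]
      simp only [PySem.List.foldl_append_ite_eq_filter, List.singleton_append,
        PySem.List.foldl_append_singleton_eq_map, List.nil_append]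
      have hend : (((h0 :: t0).length : Int)) - 1
          = (0 : Int) + ((((h0 :: t0).length - 1 : Nat)) : Int) := by
        rw [List.length_cons]; push_cast; omega
      rw [hend]
      rw [foldl_counter_append
          (g := fun c => PySem.List.pyGetD (h0 :: t0) c [] ::
            List.filter (fun x =>
              decide (PySem.List.pyGetD x 0 0 <
                  PySem.List.pyGetD (PySem.List.pyGetD (h0 :: t0) (c + 1) []) 0 0 - 1 ∧
                PySem.List.pyGetD x 0 0 >
                  PySem.List.pyGetD (PySem.List.pyGetD (h0 :: t0) c []) 0 0)) l1)
          ((h0 :: t0).length - 1) 0 []]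
      simp only [List.nil_append, selected_eq, selected_from_eq, pyGetD_lowf_map,
        decide_window_eq, decide_gt_eq]
    · rcases t0 with _ | ⟨h1, t1⟩
      · rw [if_pos (by simp : ([h0] : List (List Int)).length = 1), if_neg hH,
          if_neg (by simp : ¬([h0] : List (List Int)) = [])]
        have hr0 : ((([h0] : List (List Int)).length : Int)) - 1 = 0 := by simp
        rw [hr0, PySem.List.pyRange_one_eq_nil (a := 0) (b := 0) (by omega)]
        have e0 : PySem.List.pyGetD ([h0] : List (List Int)) 0 [] = h0 :=
          PySem.List.pyGetD_zero_cons h0 [] []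
        have em : PySem.List.pyGetD ([h0] : List (List Int)) (-1) [] = h0 := by
          rw [PySem.List.pyGetD_neg_one _ _ (by simp)]
          simp
        simp only [PySem.List.foldl_append_ite_eq_filter, List.singleton_append,
          List.foldl_nil, List.nil_append, selected_from_eq,
          pyGetD_lowf_map, decide_gt_eq, e0, em]
      · exfalso
        rw [List.length_cons, List.length_cons] at hH
        omega

-- ===== VERDICT (by name: the statement is the Claim_ definition above) =====
theorem niveles_spec : Claim_equal_niveles := by
  intro L _ _
  unfold Spec_niveles
  exact niveles_eq_alt L
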